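-- pv_equiv track=rewrite | github.com/isislab-unisa/syntactical-errors-detection | utilities/mycluster.py | find_samples
-- ===== SOURCE A (Python) =====
-- def find_samples(column: list, uniques, dictionary):
--     maxcount = 0
--     maxw = ""
--     column = [x.lower() for x in column]
--
--     for w in uniques:
--         w = w.lower()
--         if dictionary.get(w) is not None:
--             return w
--         count = column.count(w)
--         if count > maxcount:
--             maxcount = count
--             maxw = w
--     return maxw
-- ===== SOURCE B (Python) =====
-- def find_samples(column: list, uniques, dictionary):
--     # Pass 1: return the first unique whose lowercased form is a dictionary key.
--     for w in uniques:
--         lw = w.lower()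
--         if dictionary.get(lw) is not None:
--             return lw
--     # Pass 2: no dictionary hit; build a count table of the lowercased column once,
--     # then scan the uniques for the first most-frequent one (strict '>').
--     counts = {}
--     for x in column:
--         lx = x.lower()
--         counts[lx] = counts.get(lx, 0) + 1
--     maxcount = 0
--     maxw = ""
--     for w in uniques:
--         lw = w.lower()
--         c = counts.get(lw, 0)
--         if c > maxcount:
--             maxcount = c
--             maxw = lw
--     return maxw
-- ===== Notes on version B (the rewrite author's own statement) =====
-- stated objective: faster
-- what changed: A interleaves dictionary lookup and a quadratic column.count scan in one loop; B first scans uniques for a dictionary hit only, and only if none exists builds a hash count table of the lowercased column once and then scans uniques for the first maximum.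
import Mathlib
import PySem

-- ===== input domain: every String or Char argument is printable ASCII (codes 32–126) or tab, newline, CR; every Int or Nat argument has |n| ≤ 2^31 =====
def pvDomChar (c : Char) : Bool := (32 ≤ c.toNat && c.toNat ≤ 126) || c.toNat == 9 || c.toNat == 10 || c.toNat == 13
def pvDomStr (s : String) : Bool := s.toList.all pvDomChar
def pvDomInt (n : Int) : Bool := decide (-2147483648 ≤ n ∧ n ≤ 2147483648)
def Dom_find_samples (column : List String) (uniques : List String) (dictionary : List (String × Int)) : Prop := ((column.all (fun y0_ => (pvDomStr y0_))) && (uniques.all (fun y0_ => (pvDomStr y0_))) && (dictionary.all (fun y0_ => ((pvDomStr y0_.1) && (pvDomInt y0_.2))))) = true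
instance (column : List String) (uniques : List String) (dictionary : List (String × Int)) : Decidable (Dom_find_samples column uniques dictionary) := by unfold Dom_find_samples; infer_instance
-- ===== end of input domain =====

-- B replaces A's single loop (dict lookup + quadratic column.count per unique) by a
-- dictionary-hit scan followed, only on miss, by a one-pass count table and a max scan.

-- ===== PORT A =====
-- A's single loop over uniques with (maxcount, maxw) state and early return on a dict hit.
def findLoopA (col : List String) (dictionary : List (String × Int)) :
    List String → Int → String → String
  | [], _, maxw => maxw
  | w :: rest, maxcount, maxw =>
    let lw := PySem.Str.lower w
    if ((PySem.Dict.mk dictionary).get? lw).isSome then lw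
    else
      let count : Int := (PySem.List.count col lw : Int)
      if count > maxcount then findLoopA col dictionary rest count lw
      else findLoopA col dictionary rest maxcount maxw

def find_samples (column : List String) (uniques : List String) (dictionary : List (String × Int)) : String :=
  findLoopA (column.map PySem.Str.lower) dictionary uniques 0 ""

-- ===== PORT B =====
-- pass 1: first lowercased unique that is a dictionary key
def findHitB (dictionary : List (String × Int)) : List String → Option String
  | [] => none
  | w :: rest =>
    let lw := PySem.Str.lower w
    if ((PySem.Dict.mk dictionary).get? lw).isSome then some lw else findHitB dictionary rest

-- pass 2a: count table of the lowercased column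
def countsB (column : List String) : PySem.Dict String Int :=
  (column.map PySem.Str.lower).foldl (fun d x => d.modify x 0 (· + 1)) PySem.Dict.empty

-- pass 2b: first most-frequent unique via the table
def maxLoopB (counts : PySem.Dict String Int) : List String → Int → String → String
  | [], _, maxw => maxw
  | w :: rest, maxcount, maxw =>
    let lw := PySem.Str.lower w
    let c := counts.getD lw 0
    if c > maxcount then maxLoopB counts rest c lw
    else maxLoopB counts rest maxcount maxw

def find_samples_alt (column : List String) (uniques : List String) (dictionary : List (String × Int)) : String :=
  match findHitB dictionary uniques with
  | some w => w
  | none => maxLoopB (countsB column) uniques 0 ""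

-- ===== PRECONDITION & SPEC =====
def Spec_find_samples (column : List String) (uniques : List String) (dictionary : List (String × Int)) (out : String) : Prop := out = find_samples_alt column uniques dictionary
instance (column : List String) (uniques : List String) (dictionary : List (String × Int)) (out : String) : Decidable (Spec_find_samples column uniques dictionary out) := by unfold Spec_find_samples; infer_instance

-- ===== CLAIM (what is proved, stated in full; the proofs are below) =====
def Claim_equal_find_samples : Prop := ∀ (column : List String) (uniques : List String) (dictionary : List (String × Int)), Dom_find_samples column uniques dictionary → Spec_find_samples column uniques dictionary (find_samples column uniques dictionary)

-- ===== LEMMAS AND PROOFS =====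

-- The count table reads back exactly list counts.
theorem countsB_getD (column : List String) (lw : String) :
    (countsB column).getD lw 0 = ((column.map PySem.Str.lower).count lw : Int) := by
  unfold countsB
  rw [PySem.Dict.getD_foldl_modify_add_one]
  simp [PySem.Dict.getD_empty]

-- A's interleaved loop equals B's hit-scan-then-max-scan, for any running state,
-- given any count table that reads back the counts of the lowered column.
theorem loop_eq (col : List String) (dictionary : List (String × Int))
    (counts : PySem.Dict String Int)
    (h : ∀ w, counts.getD w 0 = (col.count w : Int))
    (us : List String) (mc : Int) (mw : String) :
    findLoopA col dictionary us mc mw =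
      match findHitB dictionary us with
      | some w => w
      | none => maxLoopB counts us mc mw := by
  induction us generalizing mc mw with
  | nil => simp [findLoopA, findHitB, maxLoopB]
  | cons w rest ih =>
    simp only [findLoopA, findHitB, maxLoopB, PySem.List.count_eq, h]
    split_ifs <;> simp [ih]

theorem find_samples_spec : Claim_equal_find_samples := by
  intro column uniques dictionary _
  unfold Spec_find_samples find_samples find_samples_alt
  rw [loop_eq (column.map PySem.Str.lower) dictionary (countsB column)
    (fun w => countsB_getD column w) uniques 0 ""]
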